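-- pv_equiv track=rewrite | github.com/christophe-ye-biname/codewars | 6 kyu Split Strings.py | solution
-- ===== SOURCE A (Python) =====
-- def solution(s):
--     tab = []
--
--     if len(s) % 2 == 0:
--         for i in range(0, len(s), 2):
--                 tab.append(s[i] + s[i+1])
--     else:
--         if len(s) % 2 == 1:
--             for i in range(0, len(s)-1, 2):
--                 tab.append(s[i] + s[i+1])
--             tab.append(s[len(s) - 1])
--             tab[len(tab) - 1] += '_'
--     return tab
-- ===== SOURCE B (Python) =====
-- def solution(s):
--     # iterator pairing: consume one iterator two characters at a time;
--     # next(it, '_') supplies the pad when the second char is missing.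
--     it = iter(s)
--     return [a + next(it, '_') for a in it]
-- ===== Notes on version B (the rewrite author's own statement) =====
-- stated objective: simpler
-- what changed: Replaces A's parity branch with index loops and a mutate-the-last-element fixup by pairwise consumption of a single iterator, where next(it, '_') yields the pad; no length test, no indexing, no branch.
import Mathlib
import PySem

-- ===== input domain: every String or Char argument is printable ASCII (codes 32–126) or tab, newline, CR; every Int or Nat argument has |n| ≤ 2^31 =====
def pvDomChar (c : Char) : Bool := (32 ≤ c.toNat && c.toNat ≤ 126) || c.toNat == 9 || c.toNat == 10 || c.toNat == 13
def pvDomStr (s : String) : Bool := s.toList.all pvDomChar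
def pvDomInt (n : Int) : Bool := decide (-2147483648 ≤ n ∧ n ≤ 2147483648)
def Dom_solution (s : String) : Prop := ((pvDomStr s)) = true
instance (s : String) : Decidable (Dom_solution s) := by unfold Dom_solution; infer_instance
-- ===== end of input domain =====

-- B replaces A's parity branch + index loops + last-element fixup by pairwise
-- consumption of a single iterator, next(it, '_') supplying the pad (objective: simpler).

-- ===== PORT A =====
-- literal transliteration of A: parity test, index loops over range(0, n, 2),
-- appending s[i]+s[i+1]; in the odd branch append s[n-1] and then tab[-1] += '_'
def solution (s : String) : List String :=
  let l := s.toList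
  let n : Int := l.length
  if n % 2 = 0 then
    (PySem.List.pyRange 0 n 2).foldl
      (fun tab i => tab ++ [String.ofList [PySem.List.pyGetD l i ' ', PySem.List.pyGetD l (i + 1) ' ']]) []
  else if n % 2 = 1 then
    let tab := (PySem.List.pyRange 0 (n - 1) 2).foldl
      (fun tab i => tab ++ [String.ofList [PySem.List.pyGetD l i ' ', PySem.List.pyGetD l (i + 1) ' ']]) []
    let tab := tab ++ [String.ofList [PySem.List.pyGetD l (n - 1) ' ']]
    -- tab[len(tab)-1] += '_'
    tab.dropLast ++ [tab.getLastD "" ++ "_"]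
  else []

-- ===== PORT B =====
-- Source B: 'for a in it' with 'next(it, "_")' consumes the character stream two at a
-- time; transcribed as the corresponding two-at-a-time recursion over the char list:
-- stream empty → [], 'a' drawn but next exhausted → [a + '_'], else a+b then continue
def solutionAltCore : List Char → List String
  | [] => []
  | [c] => [String.ofList [c, '_']]
  | c1 :: c2 :: rest => String.ofList [c1, c2] :: solutionAltCore rest

def solution_alt (s : String) : List String := solutionAltCore s.toList

-- ===== PRECONDITION & SPEC =====
def Spec_solution (s : String) (out : List String) : Prop := out = solution_alt s
instance (s : String) (out : List String) : Decidable (Spec_solution s out) := by unfold Spec_solution; infer_instance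

-- ===== CLAIM (what is proved, stated in full; the proofs are below) =====
def Claim_equal_solution : Prop := ∀ (s : String), Dom_solution s → Spec_solution s (solution s)

-- ===== LEMMAS AND PROOFS =====

theorem pyRange_two_nil (a b : Int) (h : b ≤ a) : PySem.List.pyRange a b 2 = [] := by
  rw [PySem.List.pyRange_of_pos a b (by norm_num)]
  simp [if_neg (not_lt.mpr h)]

theorem pyRange_two_cons (a b : Int) (h : a < b) :
    PySem.List.pyRange a b 2 = a :: PySem.List.pyRange (a + 2) b 2 := by
  rw [PySem.List.pyRange_of_pos a b (by norm_num), PySem.List.pyRange_of_pos (a + 2) b (by norm_num)]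
  rw [if_pos h]
  have hcount : ((b - a + 2 - 1) / 2).toNat = ((b - (a + 2) + 2 - 1) / 2).toNat + 1 := by omega
  rw [hcount, List.range_succ_eq_map, List.map_cons, List.map_map]
  congr 1
  · simp
  · by_cases h2 : a + 2 < b
    · rw [if_pos h2]
      apply List.map_congr_left
      intro k _
      simp [Function.comp]
      ring
    · rw [if_neg h2]
      have hz : ((b - (a + 2) + 2 - 1) / 2).toNat = 0 := by omega
      rw [hz]
      simp

theorem pyRange_two_shift (m : Int) :
    PySem.List.pyRange 2 (m + 2) 2 = (PySem.List.pyRange 0 m 2).map (fun i => i + 2) := by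
  rw [PySem.List.pyRange_of_pos 2 (m + 2) (by norm_num), PySem.List.pyRange_of_pos 0 m (by norm_num),
      List.map_map]
  simp only [show (2 < m + 2) ↔ (0 < m) by omega]
  have hc : (m + 2 - 2 + 2 - 1) / 2 = (m - 0 + 2 - 1) / 2 := by omega
  rw [hc]
  apply List.map_congr_left
  intro k _
  simp [Function.comp]
  ring

theorem pyGetD_succ (c : Char) (xs : List Char) (i : Int) (d : Char) (h : 0 ≤ i) :
    PySem.List.pyGetD (c :: xs) (i + 1) d = PySem.List.pyGetD xs i d := by
  obtain ⟨k, rfl⟩ := Int.eq_ofNat_of_zero_le h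
  have : (k : Int) + 1 = ((k + 1 : Nat) : Int) := by push_cast; ring
  rw [this, PySem.List.pyGetD_natCast, PySem.List.pyGetD_natCast]
  simp [List.getD]

theorem mem_pyRange_two_nonneg {i m : Int} (h : i ∈ PySem.List.pyRange 0 m 2) : 0 ≤ i := by
  rw [PySem.List.pyRange_of_pos 0 m (by norm_num)] at h
  simp at h
  obtain ⟨k, _, rfl⟩ := h
  positivity

theorem loop_eq (l : List Char) : ∀ (m : Nat) (acc : List String), m % 2 = 0 → m ≤ l.length →
    (PySem.List.pyRange 0 (m : Int) 2).foldl
      (fun tab i => tab ++ [String.ofList [PySem.List.pyGetD l i ' ', PySem.List.pyGetD l (i + 1) ' ']]) acc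
      = acc ++ solutionAltCore (l.take m) := by
  induction l using solutionAltCore.induct with
  | case1 =>
    intro m acc _ hle
    have : m = 0 := by simpa using hle
    subst this
    simp [pyRange_two_nil 0 0 le_rfl, solutionAltCore]
  | case2 c =>
    intro m acc hpar hle
    have : m = 0 := by simp at hle; omega
    subst this
    simp [pyRange_two_nil 0 0 le_rfl, solutionAltCore]
  | case3 c1 c2 rest ih =>
    intro m acc hpar hle
    match m, hpar with
    | 0, _ => simp [pyRange_two_nil 0 0 le_rfl, solutionAltCore]
    | (m' + 2), hpar =>
      rw [pyRange_two_cons 0 (m' + 2 : Nat) (by push_cast; omega)]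
      rw [List.foldl_cons]
      have hshift : PySem.List.pyRange (0 + 2) ((m' + 2 : Nat) : Int) 2
          = (PySem.List.pyRange 0 (m' : Nat) 2).map (fun i => i + 2) := by
        rw [show ((0 : Int) + 2) = 2 by norm_num, show (((m' + 2 : Nat) : Int)) = ((m' : Nat) : Int) + 2 by push_cast; ring]
        exact pyRange_two_shift (m' : Nat)
      rw [hshift, List.foldl_map]
      have hfun : ∀ (tab : List String) (i : Int), i ∈ PySem.List.pyRange 0 (m' : Nat) 2 →
          tab ++ [String.ofList [PySem.List.pyGetD (c1 :: c2 :: rest) (i + 2) ' ',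
                             PySem.List.pyGetD (c1 :: c2 :: rest) (i + 2 + 1) ' ']]
          = tab ++ [String.ofList [PySem.List.pyGetD rest i ' ', PySem.List.pyGetD rest (i + 1) ' ']] := by
        intro tab i hi
        have h0 : (0 : Int) ≤ i := mem_pyRange_two_nonneg hi
        have e1 : i + 2 = (i + 1) + 1 := by ring
        have e2 : i + 2 + 1 = ((i + 1) + 1) + 1 := by ring
        have g1 : PySem.List.pyGetD (c1 :: c2 :: rest) ((i + 1) + 1) ' '
            = PySem.List.pyGetD rest i ' ' := by
          rw [pyGetD_succ c1 (c2 :: rest) (i + 1) ' ' (by omega),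
              pyGetD_succ c2 rest i ' ' h0]
        have g2 : PySem.List.pyGetD (c1 :: c2 :: rest) (((i + 1) + 1) + 1) ' '
            = PySem.List.pyGetD rest (i + 1) ' ' := by
          rw [pyGetD_succ c1 (c2 :: rest) ((i + 1) + 1) ' ' (by omega),
              pyGetD_succ c2 rest (i + 1) ' ' (by omega)]
        rw [e2, e1, g1, g2]
      calc (PySem.List.pyRange 0 (m' : Nat) 2).foldl
            (fun tab i => tab ++ [String.ofList [PySem.List.pyGetD (c1 :: c2 :: rest) (i + 2) ' ',
                                  PySem.List.pyGetD (c1 :: c2 :: rest) (i + 2 + 1) ' ']])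
            (acc ++ [String.ofList [PySem.List.pyGetD (c1 :: c2 :: rest) 0 ' ',
                                PySem.List.pyGetD (c1 :: c2 :: rest) (0 + 1) ' ']])
          = (PySem.List.pyRange 0 (m' : Nat) 2).foldl
            (fun tab i => tab ++ [String.ofList [PySem.List.pyGetD rest i ' ',
                                  PySem.List.pyGetD rest (i + 1) ' ']])
            (acc ++ [String.ofList [c1, c2]]) := by
            have hinit : String.ofList [PySem.List.pyGetD (c1 :: c2 :: rest) 0 ' ',
                PySem.List.pyGetD (c1 :: c2 :: rest) (0 + 1) ' '] = String.ofList [c1, c2] := by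
              rw [show (0 : Int) + 1 = (0 : Int) + 1 from rfl, pyGetD_succ _ _ _ _ le_rfl]
              simp [PySem.List.pyGetD_zero_cons]
            rw [hinit]
            exact PySem.List.foldl_congr_mem _ _ _ _ (fun tab i hi => hfun tab i hi)
        _ = acc ++ solutionAltCore ((c1 :: c2 :: rest).take (m' + 2)) := by
            rw [ih m' (acc ++ [String.ofList [c1, c2]]) (by omega) (by simp at hle; omega)]
            simp [solutionAltCore]

theorem solutionAltCore_odd (l : List Char) (h : l.length % 2 = 1) :
    solutionAltCore l = solutionAltCore (l.take (l.length - 1)) ++ [String.ofList [l.getD (l.length - 1) ' ', '_']] := by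
  induction l using solutionAltCore.induct with
  | case1 => simp at h
  | case2 c => simp [solutionAltCore, List.getD]
  | case3 c1 c2 rest ih =>
    have hrest : rest.length % 2 = 1 := by simp at h; omega
    have hpos : 1 ≤ rest.length := by omega
    have hlen : (c1 :: c2 :: rest).length - 1 = (rest.length - 1) + 1 + 1 := by
      simp; omega
    have htake : List.take ((c1 :: c2 :: rest).length - 1) (c1 :: c2 :: rest)
        = c1 :: c2 :: List.take (rest.length - 1) rest := by
      rw [hlen, List.take_succ_cons, List.take_succ_cons]
    have hget : (c1 :: c2 :: rest).getD ((c1 :: c2 :: rest).length - 1) ' '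
        = rest.getD (rest.length - 1) ' ' := by
      rw [hlen, List.getD_cons_succ, List.getD_cons_succ]
    rw [htake, hget, solutionAltCore, solutionAltCore, ih hrest]
    simp

theorem mk_append_underscore (c : Char) : String.ofList [c] ++ "_" = String.ofList [c, '_'] := by
  rw [show ("_" : String) = String.ofList ['_'] from rfl, ← String.ofList_append]
  rfl

-- ===== VERDICT (by name: the statement is the Claim_ definition above) =====
theorem solution_spec : Claim_equal_solution := by
  intro s _
  unfold Spec_solution solution_alt
  unfold solution
  set l := s.toList with hl
  simp only
  by_cases hpar : ((l.length : Int)) % 2 = 0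
  · rw [if_pos hpar]
    have hm : l.length % 2 = 0 := by omega
    rw [loop_eq l l.length [] hm le_rfl]
    simp
  · rw [if_neg hpar, if_pos (by omega)]
    have hlen : 1 ≤ l.length := by
      by_contra hc
      have : l.length = 0 := by omega
      simp [this] at hpar
    have hcast : (l.length : Int) - 1 = ((l.length - 1 : Nat) : Int) := by omega
    rw [hcast, loop_eq l (l.length - 1) [] (by omega) (by omega)]
    rw [PySem.List.pyGetD_natCast]
    simp only [List.nil_append]
    rw [List.dropLast_concat]
    rw [List.getLastD_concat]
    rw [mk_append_underscore]
    rw [solutionAltCore_odd l (by omega)]
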